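-- pv_equiv track=rewrite | github.com/Hwon-J/pract | 프로그래머스/2/87390. n＾2 배열 자르기/n＾2 배열 자르기.py | solution
-- ===== SOURCE A (Python) =====
-- def solution(n, left, right):
--     answer = []
--     st_row = left // n
--     ed_row = right // n
--     for i in range(st_row, ed_row + 1):
--         for j in range(n):
--             if i >= j:
--                 answer.append(i+1)
--             else:
--                 answer.append(j+1)
--     st_point = left % n
--     ed_point = right - (n*st_row)
--     answer = answer[st_point:ed_point+1]
--     return answer
-- ===== SOURCE B (Python) =====
-- def solution(n, left, right):
--     return [max(divmod(k, n)) + 1 for k in range(left, right + 1)]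
-- ===== Notes on version B (the rewrite author's own statement) =====
-- stated objective: faster
-- what changed: B computes each requested entry directly as max(k//n, k%n)+1 for k in left..right, instead of materialising all full rows from left//n to right//n and slicing.
-- outside the precondition, e.g. on solution(0, 0, 2): A raises ZeroDivisionError, B raises ZeroDivisionError; on solution(-2, 0, 2): A returns [], B returns [1, 0, 1]
import Mathlib
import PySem

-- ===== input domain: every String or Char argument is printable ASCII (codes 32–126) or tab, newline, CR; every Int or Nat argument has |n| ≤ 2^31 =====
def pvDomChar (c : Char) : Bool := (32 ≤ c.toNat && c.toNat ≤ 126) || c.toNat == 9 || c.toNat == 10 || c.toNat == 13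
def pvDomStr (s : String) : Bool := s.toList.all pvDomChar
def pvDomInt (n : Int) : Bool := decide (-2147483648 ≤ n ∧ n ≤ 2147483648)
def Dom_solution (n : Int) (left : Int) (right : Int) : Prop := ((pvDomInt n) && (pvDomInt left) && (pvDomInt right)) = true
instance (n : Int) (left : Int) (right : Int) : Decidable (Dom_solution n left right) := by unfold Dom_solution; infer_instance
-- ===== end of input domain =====

-- B replaces A's build-all-rows-then-slice with a direct per-index formula max(k//n, k%n)+1 for k = left..right (objective: faster).

-- ===== PORT A =====
def solution (n : Int) (left : Int) (right : Int) : List Int :=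
  let st_row := PySem.Int.floordiv left n
  let ed_row := PySem.Int.floordiv right n
  let answer :=
    (PySem.List.pyRange st_row (ed_row + 1) 1).foldl (fun acc i =>
      (PySem.List.pyRange 0 n 1).foldl (fun acc2 j =>
        if i ≥ j then acc2 ++ [i + 1] else acc2 ++ [j + 1]) acc) []
  let st_point := PySem.Int.mod left n
  let ed_point := right - n * st_row
  PySem.List.slice answer (some st_point) (some (ed_point + 1))

-- ===== PORT B =====
def solution_alt (n : Int) (left : Int) (right : Int) : List Int :=
  (PySem.List.pyRange left (right + 1) 1).map
    (fun k => max (PySem.Int.floordiv k n) (PySem.Int.mod k n) + 1)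

-- ===== PRECONDITION & SPEC =====
-- Pre_ excludes n ≤ 0: the task's n is a side length; at n = 0 A raises ZeroDivisionError, and for
-- n < 0 A's empty result is only an accident of range(n) being empty on a meaningless input.
def Pre_solution (n : Int) (left : Int) (right : Int) : Prop := 1 ≤ n
instance (n : Int) (left : Int) (right : Int) : Decidable (Pre_solution n left right) := by unfold Pre_solution; infer_instance
def pvWitness_solution : Int × Int × Int := (3, 2, 5)
def Spec_solution (n : Int) (left : Int) (right : Int) (out : List Int) : Prop := out = solution_alt n left right
instance (n : Int) (left : Int) (right : Int) (out : List Int) : Decidable (Spec_solution n left right out) := by unfold Spec_solution; infer_instance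

-- ===== CLAIM (what is proved, stated in full; the proofs are below) =====
def Claim_equal_solution : Prop := ∀ (n : Int) (left : Int) (right : Int), Dom_solution n left right → Pre_solution n left right → Spec_solution n left right (solution n left right)

-- ===== LEMMAS AND PROOFS =====

-- one built row of A equals B's formula on the corresponding index block [n*i, n*i+n)
lemma row_eq (n i : Int) (hn : 1 ≤ n) :
    (PySem.List.pyRange 0 n 1).map (fun j => max i j + 1)
      = (PySem.List.pyRange (n * i) (n * i + n) 1).map
          (fun k => max (PySem.Int.floordiv k n) (PySem.Int.mod k n) + 1) := by
  rw [PySem.List.pyRange_one 0 n, PySem.List.pyRange_one (n * i) (n * i + n)]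
  have h1 : n - 0 = n := by ring
  have h2 : n * i + n - n * i = n := by ring
  rw [h1, h2]
  simp only [List.map_map]
  apply List.map_congr_left
  intro k hk
  simp only [List.mem_range] at hk
  have hk0 : (0 : Int) ≤ (k : Int) := Int.natCast_nonneg k
  have hk' : (k : Int) < n := by omega
  have hfd : PySem.Int.floordiv (n * i + (k : Int)) n = i := by
    rw [PySem.Int.floordiv_eq_iff_of_pos (by omega)]
    constructor
    · nlinarith
    · nlinarith
  have hmd : PySem.Int.mod (n * i + (k : Int)) n = (k : Int) := by
    have h := PySem.Int.floordiv_mul_add_mod (n * i + (k : Int)) n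
    rw [hfd] at h
    linarith [mul_comm i n]
  simp only [Function.comp_apply, zero_add, hfd, hmd]

-- flattening A's row loop over rows a..b-1 gives B's formula on the index block [n*a, n*b)
lemma rows_eq (n : Int) (hn : 1 ≤ n) (m : Nat) :
    ∀ a b : Int, (b - a).toNat = m →
    (PySem.List.pyRange a b 1).flatMap
        (fun i => (PySem.List.pyRange 0 n 1).map (fun j => max i j + 1))
      = (PySem.List.pyRange (n * a) (n * b) 1).map
          (fun k => max (PySem.Int.floordiv k n) (PySem.Int.mod k n) + 1) := by
  induction m with
  | zero =>
    intro a b hm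
    have hba : b ≤ a := by omega
    rw [PySem.List.pyRange_one_eq_nil hba,
        PySem.List.pyRange_one_eq_nil (mul_le_mul_of_nonneg_left hba (by omega))]
    simp
  | succ m ih =>
    intro a b hm
    have hab : a < b := by omega
    rw [PySem.List.pyRange_one_cons hab, List.flatMap_cons, row_eq n a hn,
        ih (a + 1) b (by omega)]
    have hsplit : n * (a + 1) ≤ n * b :=
      mul_le_mul_of_nonneg_left (by omega) (by omega)
    have hna : n * (a + 1) = n * a + n := by ring
    rw [PySem.List.pyRange_one_append (n * a) (n * a + n) (n * b) (by omega) (by omega),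
        List.map_append, hna]

theorem solution_spec : Claim_equal_solution := by
  intro n left right _ hn
  unfold Pre_solution at hn
  unfold Spec_solution solution solution_alt
  simp only
  have hinner : ∀ (i : Int) (acc : List Int),
      (PySem.List.pyRange 0 n 1).foldl (fun acc2 j =>
        if i ≥ j then acc2 ++ [i + 1] else acc2 ++ [j + 1]) acc
      = acc ++ (PySem.List.pyRange 0 n 1).map (fun j => max i j + 1) := by
    intro i acc
    refine (PySem.List.foldl_congr_mem _ _ (fun acc2 j => acc2 ++ [max i j + 1]) acc ?_).trans
      (PySem.List.foldl_append_singleton_eq_map _ _ _)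
    intro acc2 x _
    show _ = acc2 ++ [max i x + 1]
    split_ifs with h
    · rw [max_eq_left h]
    · rw [max_eq_right (by omega)]
  have houter :
      (PySem.List.pyRange (PySem.Int.floordiv left n) (PySem.Int.floordiv right n + 1) 1).foldl
        (fun acc i =>
          (PySem.List.pyRange 0 n 1).foldl (fun acc2 j =>
            if i ≥ j then acc2 ++ [i + 1] else acc2 ++ [j + 1]) acc) []
      = (PySem.List.pyRange (n * PySem.Int.floordiv left n)
            (n * (PySem.Int.floordiv right n + 1)) 1).map
          (fun k => max (PySem.Int.floordiv k n) (PySem.Int.mod k n) + 1) := by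
    refine (PySem.List.foldl_congr_mem _ _
      (fun acc i => acc ++ (PySem.List.pyRange 0 n 1).map (fun j => max i j + 1)) []
      (fun acc x _ => hinner x acc)).trans ?_
    rw [PySem.List.foldl_append_eq_flatMap,
        rows_eq n hn (PySem.Int.floordiv right n + 1 - PySem.Int.floordiv left n).toNat _ _ rfl,
        List.nil_append]
  rw [houter]
  have hstle : n * PySem.Int.floordiv left n ≤ left := by
    have h := (PySem.Int.le_floordiv_iff_mul_le (a := left) (b := n)
      (q := PySem.Int.floordiv left n) (by omega)).mp le_rfl
    linarith [mul_comm (PySem.Int.floordiv left n) n]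
  have hmodL : PySem.Int.mod left n = left - n * PySem.Int.floordiv left n := by
    have h := PySem.Int.floordiv_mul_add_mod left n
    linarith [mul_comm (PySem.Int.floordiv left n) n]
  have hrlt : right < n * (PySem.Int.floordiv right n + 1) := by
    have h := (PySem.Int.floordiv_lt_iff_lt_mul (a := right) (b := n)
      (q := PySem.Int.floordiv right n + 1) (by omega)).mp (by omega)
    linarith [mul_comm (PySem.Int.floordiv right n + 1) n]
  rw [hmodL]
  by_cases hlr : left ≤ right
  · -- main case: the slice picks out exactly the entries for indices left..right
    rw [PySem.List.slice_toNat _ (by omega) (by omega),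
        PySem.List.pyRange_one_append (n * PySem.Int.floordiv left n) left
          (n * (PySem.Int.floordiv right n + 1)) hstle (by omega),
        List.map_append,
        List.drop_left' (by simp [PySem.List.length_pyRange_one]),
        PySem.List.pyRange_one_append left (right + 1)
          (n * (PySem.Int.floordiv right n + 1)) (by omega) (by omega),
        List.map_append,
        List.take_left' (by simp [PySem.List.length_pyRange_one]; omega)]
  · -- empty case: left > right, both sides are []
    push_neg at hlr
    rw [show PySem.List.pyRange left (right + 1) 1 = [] from
          PySem.List.pyRange_one_eq_nil (by omega), List.map_nil]
    by_cases hrow : PySem.Int.floordiv right n + 1 ≤ PySem.Int.floordiv left n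
    · -- A built no rows at all
      rw [show PySem.List.pyRange (n * PySem.Int.floordiv left n)
            (n * (PySem.Int.floordiv right n + 1)) 1 = [] from
            PySem.List.pyRange_one_eq_nil (mul_le_mul_of_nonneg_left hrow (by omega)),
          List.map_nil]
      simp [PySem.List.slice]
    · -- A built rows, but the slice stop is at most its start
      push_neg at hrow
      have hrge : n * PySem.Int.floordiv left n ≤ right := by
        have h := (PySem.Int.le_floordiv_iff_mul_le (a := right) (b := n)
          (q := PySem.Int.floordiv left n) (by omega)).mp (by omega)
        linarith [mul_comm (PySem.Int.floordiv left n) n]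
      rw [PySem.List.slice_toNat _ (by omega) (by omega)]
      apply List.eq_nil_of_length_eq_zero
      simp only [List.length_take, List.length_drop, List.length_map,
        PySem.List.length_pyRange_one]
      omega
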